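-- pv_equiv track=rewrite | github.com/yusuke-matsunaga/ym-logic | utils/gen_bitcount_tbl.py | count
-- ===== SOURCE A (Python) =====
-- def count(pat) :
--     num = 0
--     for i in range(4) :
--         pat1 = (pat >> (i * 2)) & 3
--         if pat1 == 1 or pat1 == 2 :
--             num += 1
--         elif pat1 == 3 :
--             num = 0
--             break
--     return '{:2}'.format(num)
-- ===== SOURCE B (Python) =====
-- def count(pat):
--     # bit-parallel over the four low 2-bit groups: even bits vs odd bits
--     lo = pat & 0x55         # low bit of each group
--     hi = (pat >> 1) & 0x55  # high bit of each group
--     if lo & hi:             # some group is 3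
--         num = 0
--     else:                   # groups equal to 1 or 2 have exactly one bit set
--         num = bin(lo ^ hi).count('1')
--     return '{:2}'.format(num)
-- ===== Notes on version B (the rewrite author's own statement) =====
-- stated objective: alternative
-- what changed: Replaces A's per-group loop with early break by branch-free bit-parallel masking over the low byte: a saturated group (both bits set) is detected via AND of the even-bit and shifted odd-bit vectors, and the half-set groups are counted as the popcount of their XOR.
import Mathlib
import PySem

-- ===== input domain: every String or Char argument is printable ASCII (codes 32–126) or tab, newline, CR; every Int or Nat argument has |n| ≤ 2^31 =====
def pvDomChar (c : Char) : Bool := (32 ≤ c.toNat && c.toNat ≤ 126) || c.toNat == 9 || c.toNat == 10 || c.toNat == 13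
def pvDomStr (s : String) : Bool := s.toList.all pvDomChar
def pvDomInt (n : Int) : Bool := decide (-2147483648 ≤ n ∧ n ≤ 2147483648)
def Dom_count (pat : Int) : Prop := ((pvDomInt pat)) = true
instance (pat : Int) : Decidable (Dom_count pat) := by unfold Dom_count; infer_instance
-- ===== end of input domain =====

-- B replaces A's four-iteration loop over the 2-bit groups by bit-parallel masking over
-- the low 8 bits (objective: alternative algorithm, same cost).

set_option maxRecDepth 8192

-- ===== PORT A =====
-- 'for i in range(4): … break …' as structural recursion over the remaining range values
def countLoop (pat : Int) : List Int → Int → Int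
  | [], num => num
  | i :: rest, num =>
    let pat1 := PySem.Int.band (pat >>> (i * 2).toNat) 3   -- (pat >> (i*2)) & 3; i*2 ≥ 0 here
    if pat1 = 1 ∨ pat1 = 2 then countLoop pat rest (num + 1)
    else if pat1 = 3 then 0                                 -- num = 0; break
    else countLoop pat rest num

def count (pat : Int) : String :=
  let num := countLoop pat (PySem.List.pyRange 0 4 1) 0
  -- '{:2}'.format(num): right-align in width 2 with spaces
  let cs := PySem.Int.toChars num
  String.ofList (List.replicate (2 - cs.length) ' ' ++ cs)

-- ===== PORT B =====
def count_alt (pat : Int) : String :=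
  let lo := PySem.Int.band pat 0x55                 -- pat & 0x55
  let hi := PySem.Int.band (pat >>> (1:Nat)) 0x55         -- (pat >> 1) & 0x55
  -- bin(lo ^ hi).count('1') on a nonnegative int is its popcount = PySem.Int.bitCount
  let num : Int := if PySem.Int.band lo hi ≠ 0 then 0
                   else (PySem.Int.bitCount (PySem.Int.bxor lo hi) : Int)
  -- '{:2}'.format(num)
  let cs := PySem.Int.toChars num
  String.ofList (List.replicate (2 - cs.length) ' ' ++ cs)

-- ===== PRECONDITION & SPEC =====
def Spec_count (pat : Int) (out : String) : Prop := out = count_alt pat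
instance (pat : Int) (out : String) : Decidable (Spec_count pat out) := by unfold Spec_count; infer_instance

-- ===== CLAIM (what is proved, stated in full; the proofs are below) =====
def Claim_equal_count : Prop := ∀ (pat : Int), Dom_count pat → Spec_count pat (count pat)

-- ===== LEMMAS AND PROOFS =====

theorem shift1 (x : Int) : x >>> (1:Nat) = x / 2 := by
  cases x with
  | ofNat n =>
    show Int.ofNat (n >>> 1) = Int.ofNat n / 2
    simp [Nat.shiftRight_one]
  | negSucc n =>
    show Int.negSucc (n >>> 1) = Int.negSucc n / 2
    simp [Nat.shiftRight_one, Int.negSucc_eq]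
    omega

theorem shift_succ (x : Int) (k : Nat) : x >>> (k + 1) = (x >>> k) >>> (1:Nat) := by
  cases x with
  | ofNat n =>
    show Int.ofNat (n >>> (k+1)) = Int.ofNat ((n >>> k) >>> 1)
    simp [Nat.shiftRight_succ]
  | negSucc n =>
    show Int.negSucc (n >>> (k+1)) = Int.negSucc ((n >>> k) >>> 1)
    simp [Nat.shiftRight_succ]

theorem shift0 (x : Int) : x >>> (0:Nat) = x := by
  cases x <;> rfl

theorem natMask (c M : Nat) (hc : c < 2^M) (n : Nat) : n &&& c = (n % 2^M) &&& c := by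
  apply Nat.eq_of_testBit_eq
  intro i
  simp only [Nat.testBit_and, Nat.testBit_mod_two_pow]
  by_cases h : i < M
  · simp [h]
  · have : c.testBit i = false :=
      Nat.testBit_lt_two_pow (lt_of_lt_of_le hc (Nat.pow_le_pow_right (by omega) (by omega)))
    simp [this]

theorem finMask85 : ∀ m : Fin 128, 85 - (85 &&& m.val) = (127 - m.val) &&& 85 := by decide

theorem mask85 (x : Int) : PySem.Int.band x 85 = PySem.Int.band (x % 128) 85 := by
  cases x with
  | ofNat n =>
    have h1 : (Int.ofNat n) % 128 = Int.ofNat (n % 128) := by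
      show ((n : Int)) % 128 = ((n % 128 : Nat) : Int); push_cast; omega
    rw [h1]
    show PySem.Int.band ((n : Int)) 85 = PySem.Int.band ((n % 128 : Nat) : Int) 85
    have h2 : (85 : Int) = ((85 : Nat) : Int) := rfl
    rw [h2, PySem.Int.band_natCast, PySem.Int.band_natCast]
    have h5 := natMask 85 7 (by norm_num) n
    norm_num at h5
    rw [← h5]
  | negSucc n =>
    have hm : n % 128 < 128 := Nat.mod_lt _ (by norm_num)
    have h1 : (Int.negSucc n) % 128 = ((127 - n % 128 : Nat) : Int) := by
      rw [Int.negSucc_eq]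
      have : ((n % 128 : Nat) : Int) = (n : Int) % 128 := by push_cast; omega
      push_cast [Nat.cast_sub (by omega : n % 128 ≤ 127)]
      omega
    rw [h1]
    have hLHS : PySem.Int.band (Int.negSucc n) 85 = ((85 - (85 &&& n) : Nat) : Int) := by
      unfold PySem.Int.band
      have ha : ¬ (0 ≤ (Int.negSucc n)) := by omega
      simp only [if_neg ha]
      rw [if_pos (by norm_num : (0:Int) ≤ 85)]
      have hn : -Int.negSucc n - 1 = (n:Int) := by rw [Int.negSucc_eq]; ring
      simp
    rw [hLHS]
    have h2 : (85 : Int) = ((85 : Nat) : Int) := rfl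
    rw [h2, PySem.Int.band_natCast]
    congr 1
    have h3 : 85 &&& n = 85 &&& (n % 128) := by
      rw [Nat.and_comm, Nat.and_comm 85 (n % 128)]
      have h6 := natMask 85 7 (by norm_num) n
      norm_num at h6
      exact h6
    rw [h3]
    exact finMask85 ⟨n % 128, hm⟩

theorem finMask3 : ∀ m : Fin 4, 3 - (3 &&& m.val) = (3 - m.val) &&& 3 := by decide

theorem mask3 (x : Int) : PySem.Int.band x 3 = PySem.Int.band (x % 4) 3 := by
  cases x with
  | ofNat n =>
    have h1 : (Int.ofNat n) % 4 = Int.ofNat (n % 4) := by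
      show ((n : Int)) % 4 = ((n % 4 : Nat) : Int); push_cast; omega
    rw [h1]
    show PySem.Int.band ((n : Int)) 3 = PySem.Int.band ((n % 4 : Nat) : Int) 3
    have h2 : (3 : Int) = ((3 : Nat) : Int) := rfl
    rw [h2, PySem.Int.band_natCast, PySem.Int.band_natCast]
    have h5 := natMask 3 2 (by norm_num) n
    norm_num at h5
    rw [← h5]
  | negSucc n =>
    have hm : n % 4 < 4 := Nat.mod_lt _ (by norm_num)
    have h1 : (Int.negSucc n) % 4 = ((3 - n % 4 : Nat) : Int) := by
      rw [Int.negSucc_eq]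
      have : ((n % 4 : Nat) : Int) = (n : Int) % 4 := by push_cast; omega
      push_cast [Nat.cast_sub (by omega : n % 4 ≤ 3)]
      omega
    rw [h1]
    have hLHS : PySem.Int.band (Int.negSucc n) 3 = ((3 - (3 &&& n) : Nat) : Int) := by
      unfold PySem.Int.band
      have ha : ¬ (0 ≤ (Int.negSucc n)) := by omega
      simp only [if_neg ha]
      rw [if_pos (by norm_num : (0:Int) ≤ 3)]
      simp
    rw [hLHS]
    have h2 : (3 : Int) = ((3 : Nat) : Int) := rfl
    rw [h2, PySem.Int.band_natCast]
    congr 1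
    have h3 : 3 &&& n = 3 &&& (n % 4) := by
      rw [Nat.and_comm, Nat.and_comm 3 (n % 4)]
      have h6 := natMask 3 2 (by norm_num) n
      norm_num at h6
      exact h6
    rw [h3]
    exact finMask3 ⟨n % 4, hm⟩

-- A's loop only looks at pat through the masked shifted groups
theorem loopCongr (p1 p2 : Int) (is : List Int) (num : Int)
    (h : ∀ i ∈ is, PySem.Int.band (p1 >>> (i * 2).toNat) 3 = PySem.Int.band (p2 >>> (i * 2).toNat) 3) :
    countLoop p1 is num = countLoop p2 is num := by
  induction is generalizing num with
  | nil => rfl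
  | cons i rest ih =>
    simp only [countLoop]
    rw [h i (List.mem_cons_self)]
    have hrest : ∀ j ∈ rest, PySem.Int.band (p1 >>> (j * 2).toNat) 3 = PySem.Int.band (p2 >>> (j * 2).toNat) 3 :=
      fun j hj => h j (List.mem_cons_of_mem i hj)
    split_ifs <;> first | rfl | exact ih _ hrest

theorem groupRed (q r : Int) (_h0 : 0 ≤ r) (_h1 : r < 256) (k : Nat) (hk : k ≤ 6) :
    PySem.Int.band ((256 * q + r) >>> k) 3 = PySem.Int.band (r >>> k) 3 := by
  rw [mask3, mask3 (r >>> k)]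
  congr 1
  have e : ∀ x : Int, ∀ j : Nat, j ≤ 6 → x >>> j = x / 2^j := by
    intro x j hj
    induction j generalizing x with
    | zero => rw [shift0]; norm_num
    | succ m ih =>
      rw [shift_succ, ih x (by omega), shift1, pow_succ]
      rw [Int.ediv_ediv_of_nonneg (by positivity)]
  rw [e _ k hk, e _ k hk]
  interval_cases k <;> (norm_num; omega)

theorem redA (q r : Int) (h0 : 0 ≤ r) (h1 : r < 256) : count (256 * q + r) = count r := by
  unfold count
  have hrange : PySem.List.pyRange 0 4 1 = [0, 1, 2, 3] := by decide
  rw [hrange]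
  have hloop : countLoop (256 * q + r) [0,1,2,3] 0 = countLoop r [0,1,2,3] 0 := by
    apply loopCongr
    intro i hi
    fin_cases hi
    · norm_num
      calc PySem.Int.band (256 * q + r) 3
          = PySem.Int.band ((256 * q + r) >>> (0:Nat)) 3 := by rw [shift0]
        _ = PySem.Int.band (r >>> (0:Nat)) 3 := groupRed q r h0 h1 0 (by norm_num)
        _ = PySem.Int.band r 3 := by rw [shift0]
    · norm_num
      exact groupRed q r h0 h1 2 (by norm_num)
    · norm_num
      exact groupRed q r h0 h1 4 (by norm_num)
    · norm_num
      exact groupRed q r h0 h1 6 (by norm_num)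
  rw [hloop]

theorem redB (q r : Int) (_h0 : 0 ≤ r) (_h1 : r < 256) : count_alt (256 * q + r) = count_alt r := by
  unfold count_alt
  have hlo : PySem.Int.band (256 * q + r) 0x55 = PySem.Int.band r 0x55 := by
    show PySem.Int.band (256 * q + r) 85 = PySem.Int.band r 85
    rw [mask85, mask85 r]
    congr 1
    omega
  have hhi : PySem.Int.band ((256 * q + r) >>> (1:Nat)) 0x55 = PySem.Int.band (r >>> (1:Nat)) 0x55 := by
    show PySem.Int.band ((256 * q + r) >>> (1:Nat)) 85 = PySem.Int.band (r >>> (1:Nat)) 85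
    rw [mask85, mask85 (r >>> (1:Nat))]
    congr 1
    rw [shift1, shift1]
    omega
  rw [hlo, hhi]

set_option maxHeartbeats 2000000 in
theorem base : ∀ m : Fin 256, count ((m.val : Nat) : Int) = count_alt ((m.val : Nat) : Int) := by
  decide

theorem main (pat : Int) : count pat = count_alt pat := by
  have hq : pat = 256 * (pat / 256) + pat % 256 := by omega
  have h0 : 0 ≤ pat % 256 := by omega
  have h1 : pat % 256 < 256 := by omega
  have hr : pat % 256 = (((pat % 256).toNat : Nat) : Int) := by omega
  have hb := base ⟨(pat % 256).toNat, by omega⟩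
  calc count pat = count (256 * (pat / 256) + pat % 256) := by rw [← hq]
    _ = count (pat % 256) := redA _ _ h0 h1
    _ = count_alt (pat % 256) := by rw [hr]; exact hb
    _ = count_alt (256 * (pat / 256) + pat % 256) := (redB _ _ h0 h1).symm
    _ = count_alt pat := by rw [← hq]

-- ===== VERDICT (by name: the statement is the Claim_ definition above) =====
theorem count_spec : Claim_equal_count := by
  intro pat _
  exact main pat
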